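-- pv_equiv track=rewrite | github.com/bellopsal/ChonosPlan | src/Simulador.py | find_lowest_positive_indexes
-- ===== SOURCE A (Python) =====
-- def find_lowest_positive_indexes(l):
--     # Find the "best" fu to put the new instruction
--     lowest_positive = None
--     lowest_positive_index = []
--
--     for i, num in enumerate(l):
--         if num >= 0 and (lowest_positive is None or num < lowest_positive):
--             lowest_positive = num
--             lowest_positive_index = [i]
--         elif num >= 0 and num == lowest_positive:
--             lowest_positive = num
--             lowest_positive_index.append(i)
--
--     return lowest_positive_index
-- ===== SOURCE B (Python) =====
-- def find_lowest_positive_indexes(l):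
--     m = min((x for x in l if x >= 0), default=None)
--     if m is None:
--         return []
--     return [i for i, x in enumerate(l) if x == m]
-- ===== Notes on version B (the rewrite author's own statement) =====
-- stated objective: simpler
-- what changed: A's single-pass best-so-far loop with reset/append state is replaced by a two-pass reduce-then-filter: compute the minimum non-negative value, then collect all indices holding it.
import Mathlib
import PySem

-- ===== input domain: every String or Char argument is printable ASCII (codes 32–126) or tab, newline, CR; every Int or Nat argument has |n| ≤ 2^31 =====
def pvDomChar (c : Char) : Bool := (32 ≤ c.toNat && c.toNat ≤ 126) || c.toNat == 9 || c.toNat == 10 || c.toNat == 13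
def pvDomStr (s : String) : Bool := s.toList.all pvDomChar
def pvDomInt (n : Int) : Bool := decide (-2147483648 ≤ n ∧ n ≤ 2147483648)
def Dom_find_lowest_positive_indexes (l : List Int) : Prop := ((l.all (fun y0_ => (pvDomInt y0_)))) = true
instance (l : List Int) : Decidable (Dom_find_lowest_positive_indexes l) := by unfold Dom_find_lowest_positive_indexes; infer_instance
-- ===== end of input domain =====

-- B replaces A's single-pass best-so-far loop (with reset/append of the index list)
-- by a two-pass reduce-then-filter: minimum non-negative value first, then its indices.

-- ===== PORT A =====
-- the for-loop of A, state: current index, lowest_positive (Option), lowest_positive_index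
def findLoopA (l : List Int) (i : Int) (lp : Option Int) (acc : List Int) : List Int :=
  match l with
  | [] => acc
  | num :: rest =>
    if decide (0 ≤ num) && (match lp with | none => true | some v => decide (num < v)) then
      findLoopA rest (i + 1) (some num) [i]
    else if decide (0 ≤ num) && (lp == some num) then
      findLoopA rest (i + 1) (some num) (acc ++ [i])
    else
      findLoopA rest (i + 1) lp acc

def find_lowest_positive_indexes (l : List Int) : List Int :=
  findLoopA l 0 none []

-- ===== PORT B =====
def find_lowest_positive_indexes_alt (l : List Int) : List Int :=
  match PySem.List.min? (l.filter (fun x => decide (0 ≤ x))) (fun y => y) with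
  | none => []
  | some m => (PySem.List.enumerate l).filterMap (fun p => if p.2 = m then some p.1 else none)

-- ===== PRECONDITION & SPEC =====
def Spec_find_lowest_positive_indexes (l : List Int) (out : List Int) : Prop := out = find_lowest_positive_indexes_alt l
instance (l : List Int) (out : List Int) : Decidable (Spec_find_lowest_positive_indexes l out) := by unfold Spec_find_lowest_positive_indexes; infer_instance

-- ===== CLAIM (what is proved, stated in full; the proofs are below) =====
def Claim_equal_find_lowest_positive_indexes : Prop := ∀ (l : List Int), Dom_find_lowest_positive_indexes l → Spec_find_lowest_positive_indexes l (find_lowest_positive_indexes l)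

-- ===== LEMMAS AND PROOFS =====

-- the minimum of the non-negative elements
def nnMin (l : List Int) : Option Int :=
  PySem.List.min? (l.filter (fun x => decide (0 ≤ x))) (fun y => y)

-- indices (starting at i) of occurrences of m in l
def occIdx (l : List Int) (i : Int) (m : Int) : List Int :=
  match l with
  | [] => []
  | x :: xs => if x = m then i :: occIdx xs (i + 1) m else occIdx xs (i + 1) m

lemma occIdx_nil_of_not_mem {l : List Int} {m : Int} (h : m ∉ l) (i : Int) :
    occIdx l i m = [] := by
  induction l generalizing i with
  | nil => rfl
  | cons x xs ih =>
    simp only [List.mem_cons, not_or] at h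
    simp [occIdx, Ne.symm h.1, ih h.2]

lemma filterMap_enumerate_eq_occIdx (l : List Int) (i : Int) (m : Int) :
    (PySem.List.enumerate l i).filterMap (fun p => if p.2 = m then some p.1 else none)
      = occIdx l i m := by
  induction l generalizing i with
  | nil => simp [PySem.List.enumerate_nil, occIdx]
  | cons x xs ih =>
    simp only [PySem.List.enumerate_cons, List.filterMap_cons, occIdx]
    by_cases hx : x = m <;> simp [hx, ih]

lemma foldl_min_min? (fs : List Int) (x : Int) :
    fs.foldl min x = (match PySem.List.min? fs (fun y => y) with
      | none => x
      | some m => min x m) := by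
  induction fs generalizing x with
  | nil => simp [PySem.List.min?]
  | cons y t ih =>
    rw [PySem.List.min?_id_cons]
    simp only [List.foldl_cons]
    rw [ih (min x y), ih y]
    cases h : PySem.List.min? t (fun y => y) with
    | none => simp
    | some m => simp [min_assoc]

lemma nnMin_cons_neg {x : Int} (h : ¬ 0 ≤ x) (xs : List Int) :
    nnMin (x :: xs) = nnMin xs := by
  simp [nnMin, h]

lemma nnMin_cons_nonneg {x : Int} (h : 0 ≤ x) (xs : List Int) :
    nnMin (x :: xs) = some (match nnMin xs with | none => x | some m => min x m) := by
  simp only [nnMin, List.filter_cons, decide_eq_true h, if_pos]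
  rw [PySem.List.min?_id_cons, foldl_min_min?]

lemma nnMin_nonneg {l : List Int} {m : Int} (h : nnMin l = some m) : 0 ≤ m := by
  have hm := PySem.List.min?_mem h
  simp only [List.mem_filter, decide_eq_true_eq] at hm
  exact hm.2

lemma nnMin_le {l : List Int} {m : Int} (h : nnMin l = some m) :
    ∀ y ∈ l, 0 ≤ y → m ≤ y := by
  intro y hy hy0
  have := PySem.List.min?_isMin h y (by simp [List.mem_filter, hy, hy0])
  simpa using this

lemma not_mem_of_nnMin_none {l : List Int} (h : nnMin l = none) {x : Int} (hx : 0 ≤ x) :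
    x ∉ l := by
  intro hmem
  have : l.filter (fun x => decide (0 ≤ x)) = [] := by
    simpa [nnMin, PySem.List.min?_eq_none_iff] using h
  have hmem' : x ∈ l.filter (fun x => decide (0 ≤ x)) := by simp [List.mem_filter, hmem, hx]
  rw [this] at hmem'
  exact absurd hmem' (List.not_mem_nil)

lemma not_mem_of_lt_nnMin {l : List Int} {m x : Int} (h : nnMin l = some m)
    (hx : 0 ≤ x) (hlt : x < m) : x ∉ l := by
  intro hmem
  exact absurd (nnMin_le h x hmem hx) (by omega)

lemma loop_some (l : List Int) (i : Int) (v : Int) (acc : List Int) (hv : 0 ≤ v) :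
    findLoopA l i (some v) acc =
      (match nnMin l with
       | none => acc
       | some m => if m < v then occIdx l i m
                   else if m = v then acc ++ occIdx l i m
                   else acc) := by
  induction l generalizing i v acc with
  | nil => simp [findLoopA, nnMin, PySem.List.min?]
  | cons x xs ih =>
    by_cases hx : 0 ≤ x
    · rw [nnMin_cons_nonneg hx]
      by_cases hlt : x < v
      · -- reset branch
        have hstep : findLoopA (x :: xs) i (some v) acc = findLoopA xs (i + 1) (some x) [i] := by
          simp [findLoopA, hx, hlt]
        rw [hstep, ih _ _ _ hx]
        cases hns : nnMin xs with
        | none =>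
          have hnot : x ∉ xs := not_mem_of_nnMin_none hns hx
          simp [occIdx, occIdx_nil_of_not_mem hnot, hlt]
        | some m' =>
          have hm'0 : 0 ≤ m' := nnMin_nonneg hns
          rcases lt_trichotomy m' x with hc | hc | hc
          · have h1 : min x m' = m' := by omega
            have hne : x ≠ m' := by omega
            have h2 : m' < v := by omega
            simp [h1, occIdx, hne, hc, h2]
          · have h1 : min x m' = x := by omega
            have h2 : ¬ m' < x := by omega
            simp [hc, occIdx, hlt]
          · have h1 : min x m' = x := by omega
            have h2 : ¬ m' < x := by omega
            have hne : m' ≠ x := by omega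
            have hnot : x ∉ xs := not_mem_of_lt_nnMin hns hx hc
            simp [h1, h2, hne, occIdx, occIdx_nil_of_not_mem hnot, hlt]
      · by_cases heq : v = x
        · -- append branch (x = v)
          subst heq
          have hstep : findLoopA (v :: xs) i (some v) acc
              = findLoopA xs (i + 1) (some v) (acc ++ [i]) := by
            simp [findLoopA, hv]
          rw [hstep, ih _ _ _ hv]
          cases hns : nnMin xs with
          | none =>
            have hnot : v ∉ xs := not_mem_of_nnMin_none hns hv
            simp [occIdx, occIdx_nil_of_not_mem hnot]
          | some m' =>
            have hm'0 : 0 ≤ m' := nnMin_nonneg hns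
            rcases lt_trichotomy m' v with hc | hc | hc
            · have h1 : min v m' = m' := by omega
              have hne : v ≠ m' := by omega
              simp [h1, hne, hc, occIdx]
            · have h1 : min v m' = v := by omega
              have h2 : ¬ m' < v := by omega
              simp [hc, occIdx]
            · have h1 : min v m' = v := by omega
              have h2 : ¬ m' < v := by omega
              have hne : m' ≠ v := by omega
              have hnot : v ∉ xs := not_mem_of_lt_nnMin hns hv hc
              simp [h1, h2, hne, occIdx, occIdx_nil_of_not_mem hnot]
        · -- skip branch (x > v)
          have hgt : v < x := by omega
          have hne' : v ≠ x := by omega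
          have hstep : findLoopA (x :: xs) i (some v) acc = findLoopA xs (i + 1) (some v) acc := by
            simp [findLoopA, hlt, hne']
          rw [hstep, ih _ _ _ hv]
          cases hns : nnMin xs with
          | none =>
            have h1 : ¬ x < v := by omega
            have h2 : x ≠ v := by omega
            simp [h1, h2]
          | some m' =>
            have hm'0 : 0 ≤ m' := nnMin_nonneg hns
            rcases lt_trichotomy m' v with hc | hc | hc
            · have h1 : min x m' = m' := by omega
              have hne : x ≠ m' := by omega
              simp [h1, hne, hc, occIdx]
            · subst hc
              have h1 : min x m' = m' := by omega
              have h2 : ¬ m' < m' := by omega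
              have hne : x ≠ m' := by omega
              simp [h1, hne, occIdx]
            · have h1 : ¬ min x m' < v := by omega
              have h2 : min x m' ≠ v := by omega
              have h3 : ¬ m' < v := by omega
              have h4 : m' ≠ v := by omega
              simp [h1, h2, h3, h4]
    · -- negative element: skipped
      have hstep : findLoopA (x :: xs) i (some v) acc = findLoopA xs (i + 1) (some v) acc := by
        simp [findLoopA, hx]
      rw [hstep, ih _ _ _ hv, nnMin_cons_neg hx]
      cases hns : nnMin xs with
      | none => simp
      | some m' =>
        have hne : x ≠ m' := by have := nnMin_nonneg hns; omega
        simp [occIdx, hne]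

lemma loop_none (l : List Int) (i : Int) (acc : List Int) :
    findLoopA l i none acc =
      (match nnMin l with
       | none => acc
       | some m => occIdx l i m) := by
  induction l generalizing i acc with
  | nil => simp [findLoopA, nnMin, PySem.List.min?]
  | cons x xs ih =>
    by_cases hx : 0 ≤ x
    · have hstep : findLoopA (x :: xs) i none acc = findLoopA xs (i + 1) (some x) [i] := by
        simp [findLoopA, hx]
      rw [hstep, loop_some _ _ _ _ hx, nnMin_cons_nonneg hx]
      cases hns : nnMin xs with
      | none =>
        have hnot : x ∉ xs := not_mem_of_nnMin_none hns hx
        simp [occIdx, occIdx_nil_of_not_mem hnot]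
      | some m' =>
        have hm'0 : 0 ≤ m' := nnMin_nonneg hns
        rcases lt_trichotomy m' x with hc | hc | hc
        · have h1 : min x m' = m' := by omega
          have hne : x ≠ m' := by omega
          simp [h1, hne, hc, occIdx]
        · have h1 : min x m' = x := by omega
          have h2 : ¬ m' < x := by omega
          simp [hc, occIdx]
        · have h1 : min x m' = x := by omega
          have h2 : ¬ m' < x := by omega
          have hne : m' ≠ x := by omega
          have hnot : x ∉ xs := not_mem_of_lt_nnMin hns hx hc
          simp [h1, h2, hne, occIdx, occIdx_nil_of_not_mem hnot]
    · have hstep : findLoopA (x :: xs) i none acc = findLoopA xs (i + 1) none acc := by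
        simp [findLoopA, hx]
      rw [hstep, ih, nnMin_cons_neg hx]
      cases hns : nnMin xs with
      | none => simp
      | some m' =>
        have hne : x ≠ m' := by have := nnMin_nonneg hns; omega
        simp [occIdx, hne]

-- ===== VERDICT (by name: the statement is the Claim_ definition above) =====
theorem find_lowest_positive_indexes_spec : Claim_equal_find_lowest_positive_indexes := by
  intro l _
  show find_lowest_positive_indexes l = find_lowest_positive_indexes_alt l
  rw [find_lowest_positive_indexes, loop_none]
  rw [find_lowest_positive_indexes_alt]
  show (match nnMin l with | none => [] | some m => occIdx l 0 m)
      = (match nnMin l with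
         | none => []
         | some m => (PySem.List.enumerate l).filterMap (fun p => if p.2 = m then some p.1 else none))
  cases nnMin l with
  | none => rfl
  | some m => simp [filterMap_enumerate_eq_occIdx]
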